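-- pv_equiv track=rewrite | github.com/cirosantilli/project-euler-solutions | solvers/803.py | u0_candidates
-- ===== SOURCE A (Python) =====
-- A = 25214903917
--
-- C = 11
--
-- MOD18 = 1 << 18
--
-- MASK18 = MOD18 - 1
--
-- def u0_candidates(pattern_vals):
--     """Brute-force u0 in [0,2^18) that satisfies the mod-4 constraint for the whole pattern."""
--     need = [v & 3 for v in pattern_vals]
--     L = len(need)
--     res = []
--     for u0 in range(MOD18):
--         u = u0
--         ok = True
--         for i in range(L):
--             if ((u >> 16) & 3) != need[i]:
--                 ok = False
--                 break
--             u = (A * u + C) & MASK18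
--         if ok:
--             res.append(u0)
--     return res
-- ===== SOURCE B (Python) =====
-- A = 25214903917
-- C = 11
-- MOD18 = 1 << 18
-- MASK18 = MOD18 - 1
--
-- def u0_candidates(pattern_vals):
--     """Transposed loops: one survivor list of (u0, u) pairs, filtered per pattern constraint."""
--     survivors = [(u0, u0) for u0 in range(MOD18)]
--     for v in pattern_vals:
--         n = v & 3
--         survivors = [(u0, (A * u + C) & MASK18)
--                      for (u0, u) in survivors if ((u >> 16) & 3) == n]
--     return [u0 for (u0, _) in survivors]
-- ===== Notes on version B (the rewrite author's own statement) =====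
-- stated objective: alternative
-- what changed: Replaced A's per-seed inner constraint loop (with break) by a transposed decomposition: one survivor list of (u0, state) pairs for all 2^18 seeds, filtered and advanced once per pattern constraint.
import Mathlib
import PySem

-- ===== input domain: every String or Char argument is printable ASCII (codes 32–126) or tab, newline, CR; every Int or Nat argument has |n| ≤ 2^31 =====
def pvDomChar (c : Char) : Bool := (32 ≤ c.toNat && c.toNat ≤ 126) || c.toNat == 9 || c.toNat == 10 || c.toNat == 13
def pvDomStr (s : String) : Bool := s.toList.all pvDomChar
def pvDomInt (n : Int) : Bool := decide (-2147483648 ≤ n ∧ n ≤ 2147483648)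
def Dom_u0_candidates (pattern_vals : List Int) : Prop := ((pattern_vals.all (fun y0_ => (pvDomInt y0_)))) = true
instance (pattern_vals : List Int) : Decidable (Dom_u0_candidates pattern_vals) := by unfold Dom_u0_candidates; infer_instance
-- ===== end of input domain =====

-- B transposes A's nested loops: one survivor list of (u0, state) pairs filtered per pattern constraint (alternative decomposition, same cost).


-- ===== PORT A =====
-- inner 'for i in range(L)' loop with its break, recursing over the need list with state u
def pvInnerA : List Int → Int → Bool
  | [], _ => true
  | n :: rest, u =>
      if PySem.Int.band (u >>> 16) 3 ≠ n then false
      else pvInnerA rest (PySem.Int.band (25214903917 * u + 11) 262143)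

def u0_candidates (pattern_vals : List Int) : List Int :=
  let need := pattern_vals.map (fun v => PySem.Int.band v 3)
  (PySem.List.pyRange 0 262144 1).foldl
    (fun res u0 => if pvInnerA need u0 then res ++ [u0] else res) []

-- ===== PORT B =====
def u0_candidates_alt (pattern_vals : List Int) : List Int :=
  let survivors := (PySem.List.pyRange 0 262144 1).map (fun u0 => (u0, u0))
  (pattern_vals.foldl
      (fun s v =>
        (s.filter (fun p : Int × Int => PySem.Int.band (p.2 >>> 16) 3 == PySem.Int.band v 3)).map
          (fun p : Int × Int => (p.1, PySem.Int.band (25214903917 * p.2 + 11) 262143)))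
      survivors).map (fun p => p.1)

-- ===== PRECONDITION & SPEC =====
def Spec_u0_candidates (pattern_vals : List Int) (out : List Int) : Prop := out = u0_candidates_alt pattern_vals
instance (pattern_vals : List Int) (out : List Int) : Decidable (Spec_u0_candidates pattern_vals out) := by unfold Spec_u0_candidates; infer_instance

-- ===== CLAIM (what is proved, stated in full; the proofs are below) =====
def Claim_equal_u0_candidates : Prop := ∀ (pattern_vals : List Int), Dom_u0_candidates pattern_vals → Spec_u0_candidates pattern_vals (u0_candidates pattern_vals)

-- ===== LEMMAS AND PROOFS =====

-- the LCG state after processing every constraint (B advances it only along surviving entries)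
def pvAdv : List Int → Int → Int
  | [], u => u
  | _ :: rest, u => pvAdv rest (PySem.Int.band (25214903917 * u + 11) 262143)

theorem pvInnerA_cons (n : Int) (rest : List Int) (u : Int) :
    pvInnerA (n :: rest) u =
      ((PySem.Int.band (u >>> 16) 3 == n) &&
        pvInnerA rest (PySem.Int.band (25214903917 * u + 11) 262143)) := by
  by_cases h : PySem.Int.band (u >>> 16) 3 = n <;> simp [pvInnerA, h]

theorem pvFoldB (l : List Int) :
    ∀ s : List (Int × Int),
      l.foldl
        (fun s v =>
          (s.filter (fun p : Int × Int => PySem.Int.band (p.2 >>> 16) 3 == PySem.Int.band v 3)).map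
            (fun p : Int × Int => (p.1, PySem.Int.band (25214903917 * p.2 + 11) 262143))) s
      = (s.filter (fun p => pvInnerA (l.map (fun v => PySem.Int.band v 3)) p.2)).map
          (fun p => (p.1, pvAdv l p.2)) := by
  induction l with
  | nil => intro s; simp [pvInnerA, pvAdv]
  | cons v rest ih =>
      intro s
      simp only [List.foldl_cons, ih, List.filter_map, List.map_map, List.filter_filter,
        List.map_cons, pvInnerA_cons]
      simp only [Function.comp_def, Bool.and_comm, pvAdv]

theorem u0_candidates_eq (pattern_vals : List Int) :
    u0_candidates pattern_vals = u0_candidates_alt pattern_vals := by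
  unfold u0_candidates u0_candidates_alt
  rw [PySem.List.foldl_append_if_eq_filter]
  simp only [pvFoldB, List.filter_map, List.map_map]
  simp [Function.comp_def]

-- ===== VERDICT (by name: the statement is the Claim_ definition above) =====
theorem u0_candidates_spec : Claim_equal_u0_candidates := by
  intro pv _
  show u0_candidates pv = u0_candidates_alt pv
  exact u0_candidates_eq pv
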